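-- pv_equiv track=rewrite | github.com/cloud-forward/deployguard-analysis | src/facts/extractors/k8s_extractor.py | _labels_match_selector
-- ===== SOURCE A (Python) =====
-- from typing import Any, Dict, List
--
-- def _labels_match_selector(
--     labels: Dict[str, str], selector: Dict[str, str]
-- ) -> bool:
--     """Check if labels match selector"""
--     if not selector:
--         return False
--
--     for key, value in selector.items():
--         if labels.get(key) != value:
--             return False
--
--     return True
-- ===== SOURCE B (Python) =====
-- def _labels_match_selector(labels, selector):
--     """Check if labels match selector"""
--     matched = sum(1 for key, value in labels.items() if selector.get(key) == value)
--     return matched == len(selector) and matched > 0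
-- ===== Notes on version B (the rewrite author's own statement) =====
-- stated objective: alternative
-- what changed: Inverts the traversal: instead of looping over the selector with per-key labels.get lookups and early exit, B makes a single counting pass over the LABELS, counting entries whose (key, value) also appears in the selector, and returns matched == len(selector) and matched > 0 (which also covers the empty-selector case without a guard).
import Mathlib
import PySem

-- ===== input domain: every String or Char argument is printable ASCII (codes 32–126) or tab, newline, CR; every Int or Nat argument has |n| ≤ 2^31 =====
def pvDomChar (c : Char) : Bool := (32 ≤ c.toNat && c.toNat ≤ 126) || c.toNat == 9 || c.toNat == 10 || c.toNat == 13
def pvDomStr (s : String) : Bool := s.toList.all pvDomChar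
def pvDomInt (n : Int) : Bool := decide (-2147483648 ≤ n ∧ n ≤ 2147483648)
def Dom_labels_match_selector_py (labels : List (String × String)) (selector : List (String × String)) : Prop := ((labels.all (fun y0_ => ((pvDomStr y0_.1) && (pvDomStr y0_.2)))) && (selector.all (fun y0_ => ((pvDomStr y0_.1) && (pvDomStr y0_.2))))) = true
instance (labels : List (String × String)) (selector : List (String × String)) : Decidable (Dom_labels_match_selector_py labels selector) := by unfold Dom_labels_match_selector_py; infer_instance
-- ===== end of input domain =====

-- B inverts the traversal: a single counting pass over the labels (how many label entries
-- also appear in the selector) replaces A's per-selector-key lookup loop; about the return value only.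

-- ===== PORT A =====
-- the 'for key, value in selector.items(): if labels.get(key) != value: return False' loop
def lmsLoopA (ld : PySem.Dict String String) : List (String × String) → Bool
  | [] => true
  | (k, v) :: rest => if ld.get? k ≠ some v then false else lmsLoopA ld rest

def labels_match_selector_py (labels : List (String × String)) (selector : List (String × String)) : Bool :=
  let ld := PySem.Dict.ofList labels
  let sd := PySem.Dict.ofList selector
  if sd.items.isEmpty then false
  else lmsLoopA ld sd.items

-- ===== PORT B =====
-- matched = sum(1 for key, value in labels.items() if selector.get(key) == value);
-- return matched == len(selector) and matched > 0
def labels_match_selector_py_alt (labels : List (String × String)) (selector : List (String × String)) : Bool :=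
  let ld := PySem.Dict.ofList labels
  let sd := PySem.Dict.ofList selector
  let matched := ld.items.countP (fun kv => sd.get? kv.1 == some kv.2)
  decide (matched = sd.size) && decide (0 < matched)

-- ===== PRECONDITION & SPEC =====
def Spec_labels_match_selector_py (labels : List (String × String)) (selector : List (String × String)) (out : Bool) : Prop := out = labels_match_selector_py_alt labels selector
instance (labels : List (String × String)) (selector : List (String × String)) (out : Bool) : Decidable (Spec_labels_match_selector_py labels selector out) := by unfold Spec_labels_match_selector_py; infer_instance

-- ===== CLAIM (what is proved, stated in full; the proofs are below) =====
def Claim_equal_labels_match_selector_py : Prop := ∀ (labels : List (String × String)) (selector : List (String × String)), Dom_labels_match_selector_py labels selector → Spec_labels_match_selector_py labels selector (labels_match_selector_py labels selector)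

-- ===== LEMMAS AND PROOFS =====
-- A's early-exit loop is the 'all' of its per-pair test
theorem lmsLoopA_eq_all (ld : PySem.Dict String String) :
    ∀ (L : List (String × String)), lmsLoopA ld L = L.all (fun kv => ld.get? kv.1 == some kv.2)
  | [] => rfl
  | (k, v) :: rest => by
    simp only [lmsLoopA, List.all_cons]
    by_cases h : ld.get? k = some v
    · simp [h, lmsLoopA_eq_all ld rest]
    · simp [h]

-- B's count over the labels is the length of the labels items that are also selector items
theorem count_eq_filter_len (ld sd : PySem.Dict String String) (hS : sd.keys.Nodup) :
    ld.items.countP (fun kv => sd.get? kv.1 == some kv.2)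
      = (ld.items.filter (fun kv => decide (kv ∈ sd.items))).length := by
  rw [← List.countP_eq_length_filter]
  apply List.countP_congr
  intro kv _
  simp only [beq_iff_eq, decide_eq_true_eq]
  exact PySem.Dict.get?_eq_some_iff_mem_items sd kv.1 kv.2 hS

theorem labels_match_selector_py_spec_aux (labels selector : List (String × String)) :
    labels_match_selector_py labels selector = labels_match_selector_py_alt labels selector := by
  unfold labels_match_selector_py labels_match_selector_py_alt
  dsimp only
  set ld := PySem.Dict.ofList labels with hld
  set sd := PySem.Dict.ofList selector with hsd
  have hL : ld.keys.Nodup := PySem.Dict.nodup_keys_ofList labels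
  have hS : sd.keys.Nodup := PySem.Dict.nodup_keys_ofList selector
  have hLi : ld.items.Nodup := (List.Nodup.of_map _ hL)
  have hSi : sd.items.Nodup := (List.Nodup.of_map _ hS)
  rw [lmsLoopA_eq_all, count_eq_filter_len ld sd hS]
  set F := ld.items.filter (fun kv => decide (kv ∈ sd.items)) with hF
  have hFnd : F.Nodup := hLi.filter _
  have hFsub : F ⊆ sd.items := fun x hx => by
    have := List.of_mem_filter hx; simpa using this
  have hsize : sd.size = sd.items.length := rfl
  by_cases hall : ∀ kv ∈ sd.items, ld.get? kv.1 = some kv.2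
  · -- every selector pair is a label pair: F has the same members as sd.items
    have hmem : ∀ x, x ∈ F ↔ x ∈ sd.items := by
      intro x
      constructor
      · exact fun hx => hFsub hx
      · intro hx
        have hxl : x ∈ ld.items := PySem.Dict.mem_items_of_get?_eq_some ld (hall x hx)
        exact List.mem_filter.mpr ⟨hxl, by simpa using hx⟩
    have hperm : F.Perm sd.items :=
      List.perm_of_nodup_nodup_toFinset_eq hFnd hSi
        (by ext x; simp [List.mem_toFinset, hmem])
    have hlen : F.length = sd.items.length := hperm.length_eq
    have halltrue : sd.items.all (fun kv => ld.get? kv.1 == some kv.2) = true := by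
      rw [List.all_eq_true]; intro kv hkv; simpa using hall kv hkv
    rw [halltrue, hsize, hlen]
    cases hcase : sd.items with
    | nil => simp
    | cons a t => simp
  · -- some selector pair is missing from the labels: F is strictly smaller than sd.items
    push Not at hall
    obtain ⟨kv, hkv, hne⟩ := hall
    have hkvnotl : kv ∉ ld.items := fun hmem =>
      hne ((PySem.Dict.get?_eq_some_iff_mem_items ld kv.1 kv.2 hL).mpr hmem)
    have hkvnotF : kv ∉ F := fun hx => hkvnotl (List.mem_of_mem_filter hx)
    have hlt : F.length < sd.items.length := by
      have hsp : F.Subperm sd.items := List.Nodup.subperm hFnd hFsub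
      rcases lt_or_eq_of_le hsp.length_le with h | h
      · exact h
      · exfalso
        have hperm : F.Perm sd.items := hsp.perm_of_length_le (le_of_eq h.symm)
        exact hkvnotF (hperm.mem_iff.mpr hkv)
    have hallfalse : sd.items.all (fun kv => ld.get? kv.1 == some kv.2) = false := by
      rw [List.all_eq_false]
      exact ⟨kv, hkv, by simpa using hne⟩
    have hnotempty : sd.items.isEmpty = false := by
      cases h : sd.items with
      | nil => rw [h] at hkv; cases hkv
      | cons a t => rfl
    rw [hallfalse, hnotempty, hsize]
    simp [Nat.ne_of_lt hlt]

-- ===== VERDICT (by name: the statement is the Claim_ definition above) =====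
theorem labels_match_selector_py_spec : Claim_equal_labels_match_selector_py := by
  intro labels selector _
  exact labels_match_selector_py_spec_aux labels selector
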